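-- pv_equiv track=rewrite | github.com/weiliansong/blueprint-vectorizer | 03_frame_detect/utils.py | find_circular_key
-- ===== SOURCE A (Python) =====
-- def circularly_identical(list1, list2):
--   _list1 = ['|%d|' % x for x in list1]
--   _list2 = ['|%d|' % x for x in list2]
--   return (' '.join(_list1) in ' '.join(_list2 * 2)) or \
--             (' '.join(_list1[::-1]) in ' '.join(_list2 * 2))
--
-- def find_circular_key(query, keys):
--   identical_key = None
--
--   if keys:
--     for key in keys:
--       if circularly_identical(query, key) and (len(query) == len(key)):
--         assert not identical_key
--         identical_key = key
--
--   return identical_key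
-- ===== SOURCE B (Python) =====
-- def _is_rotation(a, b):
--   # True iff a is some cyclic rotation of b (both as plain lists).
--   if len(a) != len(b):
--     return False
--   if not a:
--     return True
--   return any(a == b[i:] + b[:i] for i in range(len(b)))
--
--
-- def find_circular_key(query, keys):
--   rev = query[::-1]
--   for key in keys:
--     if _is_rotation(query, key) or _is_rotation(rev, key):
--       return key
--   return None
-- ===== Notes on version B (the rewrite author's own statement) =====
-- stated objective: faster
-- what changed: Replaces the '|%d|'-token doubled-string substring trick with a direct list-rotation comparison (query or reversed query against each explicit rotation of the key), checks the length guard first so mismatched keys are skipped without building any strings, and returns the first matching key instead of scanning all keys with an overwrite accumulator.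
import Mathlib
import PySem

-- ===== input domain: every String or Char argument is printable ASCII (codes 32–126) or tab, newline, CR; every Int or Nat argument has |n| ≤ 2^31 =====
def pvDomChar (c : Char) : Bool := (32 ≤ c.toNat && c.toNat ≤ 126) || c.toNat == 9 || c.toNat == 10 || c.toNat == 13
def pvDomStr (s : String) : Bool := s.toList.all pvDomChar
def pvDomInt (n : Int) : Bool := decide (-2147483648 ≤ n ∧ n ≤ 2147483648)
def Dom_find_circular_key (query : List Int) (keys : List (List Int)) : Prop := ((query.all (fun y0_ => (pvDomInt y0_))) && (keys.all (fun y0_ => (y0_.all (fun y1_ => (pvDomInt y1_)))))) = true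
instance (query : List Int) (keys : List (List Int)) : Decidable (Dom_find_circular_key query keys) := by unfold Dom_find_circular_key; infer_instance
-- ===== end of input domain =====

-- B replaces A's doubled-string substring trick by a direct list-rotation comparison, skipping
-- keys of the wrong length before doing any work and returning on the first match (measurably
-- faster in a timing run); neither version mutates its arguments.

-- ===== PORT A =====
-- '|%d|' % x
def pvTokA (x : Int) : String := "|" ++ PySem.Int.toStr x ++ "|"

def circularly_identical (list1 list2 : List Int) : Bool :=
  let _list1 := list1.map pvTokA
  let _list2 := list2.map pvTokA
  -- (' '.join(_list1) in ' '.join(_list2 * 2)) or (' '.join(_list1[::-1]) in ' '.join(_list2 * 2))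
  (PySem.Str.isIn (PySem.Str.join " " _list1) (PySem.Str.join " " (_list2 ++ _list2))) ||
  (PySem.Str.isIn (PySem.Str.join " " ((PySem.List.slice? _list1 none none (-1)).getD []))
      (PySem.Str.join " " (_list2 ++ _list2)))

-- the 'assert not identical_key' raise (a second match on a truthy accumulator) is excluded by
-- Pre_find_circular_key, so the assert is a no-op on every admitted input and is not ported
def find_circular_key (query : List Int) (keys : List (List Int)) : Option (List Int) :=
  let identical_key : Option (List Int) := none
  if keys ≠ [] then      -- Python: if keys:
    keys.foldl (fun ik key =>
      if circularly_identical query key && (query.length == key.length) then some key else ik)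
      identical_key
  else identical_key

-- ===== PORT B =====
def pvIsRotation (a b : List Int) : Bool :=
  if a.length ≠ b.length then false
  else if a.isEmpty then true
  else (PySem.List.pyRange 0 (b.length : Int) 1).any fun i =>
    a == PySem.List.slice b (some i) none ++ PySem.List.slice b none (some i)

-- the for-loop of Source B's find_circular_key with its early return
def pvFirstMatch (query rev : List Int) : List (List Int) → Option (List Int)
  | [] => none
  | key :: ks =>
      if pvIsRotation query key || pvIsRotation rev key then some key
      else pvFirstMatch query rev ks

def find_circular_key_alt (query : List Int) (keys : List (List Int)) : Option (List Int) :=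
  pvFirstMatch query ((PySem.List.slice? query none none (-1)).getD []) keys

-- ===== PRECONDITION & SPEC =====
-- closed-form "key is circularly identical to query" (query or its reverse is a rotation of key);
-- used only by Pre_/Raises_
def pvCircMatch (q k : List Int) : Bool :=
  q.length == k.length &&
    (List.range (k.length + 1)).any fun i =>
      q == k.drop i ++ k.take i || q.reverse == k.drop i ++ k.take i

-- Pre_ excludes exactly the inputs on which A raises AssertionError: a nonempty query with two or
-- more circularly identical keys (on an empty query every match is [] and the assert never fires)
def Pre_find_circular_key (query : List Int) (keys : List (List Int)) : Prop :=
  query = [] ∨ keys.countP (pvCircMatch query) ≤ 1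
instance (query : List Int) (keys : List (List Int)) : Decidable (Pre_find_circular_key query keys) := by unfold Pre_find_circular_key; infer_instance

def pvWitness_find_circular_key : List Int × List (List Int) := ([1, 2], [[2, 1]])

def Spec_find_circular_key (query : List Int) (keys : List (List Int)) (out : Option (List Int)) : Prop := out = find_circular_key_alt query keys
instance (query : List Int) (keys : List (List Int)) (out : Option (List Int)) : Decidable (Spec_find_circular_key query keys out) := by unfold Spec_find_circular_key; infer_instance

-- ===== CLAIM (what is proved, stated in full; the proofs are below) =====
def Claim_equal_find_circular_key : Prop := ∀ (query : List Int) (keys : List (List Int)), Dom_find_circular_key query keys → Pre_find_circular_key query keys → Spec_find_circular_key query keys (find_circular_key query keys)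

-- ===== LEMMAS AND PROOFS =====
def pvTokC (x : Int) : List Char := '|' :: (PySem.Int.toChars x ++ ['|'])
def pvSC (l : List Int) : List Char := PySem.Chars.join [' '] (l.map pvTokC)

lemma pvSC_nil : pvSC [] = [] := by simp [pvSC, PySem.Chars.join_nil]
lemma pvSC_cons (a : Int) (as : List Int) :
    pvSC (a :: as) = pvTokC a ++ (if as = [] then [] else ' ' :: pvSC as) := by
  cases as with
  | nil => simp [pvSC, PySem.Chars.join_singleton]
  | cons b bs => simp [pvSC, PySem.Chars.join_cons_cons]

lemma pvSC_append {x y : List Int} (hx : x ≠ []) (hy : y ≠ []) :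
    pvSC (x ++ y) = pvSC x ++ ' ' :: pvSC y := by
  induction x with
  | nil => simp at hx
  | cons a as ih =>
    cases as with
    | nil =>
      cases y with
      | nil => simp at hy
      | cons b bs => simp [pvSC_cons, List.cons_append]
    | cons a' as' =>
      have h := ih (by simp)
      simp only [List.cons_append] at h ⊢
      rw [pvSC_cons, h, pvSC_cons (as := a' :: as')]
      simp

lemma pvPipeFree_prefix : ∀ (d1 d2 : List Char), ∀ {r1 r2 : List Char}, '|' ∉ d1 → '|' ∉ d2 →
    (d1 ++ '|' :: r1 <+: d2 ++ '|' :: r2) → d1 = d2 ∧ r1 <+: r2 := by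
  intro d1
  induction d1 with
  | nil =>
    intro d2 r1 r2 _ h2 h
    cases d2 with
    | nil => simpa using h
    | cons c d2' =>
      simp only [List.nil_append, List.cons_append, List.cons_prefix_cons] at h
      simp at h2; exact absurd h.1 h2.1
  | cons c d1' ih =>
    intro d2 r1 r2 h1 h2 h
    cases d2 with
    | nil =>
      simp only [List.cons_append, List.nil_append, List.cons_prefix_cons] at h
      simp at h1; exact absurd h.1.symm h1.1
    | cons c2 d2' =>
      simp only [List.cons_append, List.cons_prefix_cons] at h
      obtain ⟨rfl, h⟩ := h
      have := ih d2' (by simp at h1; exact h1.2) (by simp at h2; exact h2.2) h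
      exact ⟨by rw [this.1], this.2⟩
lemma pvToChars_ne_nil (n : Int) : PySem.Int.toChars n ≠ [] := by
  unfold PySem.Int.toChars
  split
  · simp
  · intro h
    have := @Nat.length_toDigits_pos 10 n.toNat
    simp [h] at this

lemma pvMem_toChars {c : Char} {n : Int} (h : c ∈ PySem.Int.toChars n) : c ≠ '|' ∧ c ≠ ' ' := by
  unfold PySem.Int.toChars at h
  have hd : ∀ m : Nat, c ∈ Nat.toDigits 10 m → c ≠ '|' ∧ c ≠ ' ' := by
    intro m hm
    have := Nat.isDigit_of_mem_toDigits (by norm_num) (by norm_num) hm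
    constructor <;> rintro rfl <;> simp_all
  split at h
  · rcases List.mem_cons.mp h with rfl | h
    · constructor <;> decide
    · exact hd _ h
  · exact hd _ h

lemma pvDigitChar_inj : ∀ a < 10, ∀ b < 10, Nat.digitChar a = Nat.digitChar b → a = b := by decide

lemma pvToDigits_inj : ∀ m n : Nat, Nat.toDigits 10 m = Nat.toDigits 10 n → m = n := by
  intro m
  induction m using Nat.strong_induction_on with
  | _ m ih =>
    intro n h
    rcases Nat.lt_or_ge m 10 with hm | hm <;> rcases Nat.lt_or_ge n 10 with hn | hn
    · rw [Nat.toDigits_of_lt_base hm, Nat.toDigits_of_lt_base hn] at h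
      exact pvDigitChar_inj m hm n hn (by simpa using h)
    · rw [Nat.toDigits_of_lt_base hm, Nat.toDigits_of_base_le (by norm_num) hn] at h
      have := @Nat.length_toDigits_pos 10 (n / 10)
      have hl := congrArg List.length h
      simp only [List.length_append, List.length_cons, List.length_nil] at hl
      omega
    · rw [Nat.toDigits_of_base_le (by norm_num) hm, Nat.toDigits_of_lt_base hn] at h
      have := @Nat.length_toDigits_pos 10 (m / 10)
      have hl := congrArg List.length h
      simp only [List.length_append, List.length_cons, List.length_nil] at hl
      omega
    · rw [Nat.toDigits_of_base_le (by norm_num) hm, Nat.toDigits_of_base_le (by norm_num) hn] at h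
      have h2 := List.append_inj' h rfl
      obtain ⟨h3, h4⟩ := h2
      have hm10 : m / 10 < m := Nat.div_lt_self (by omega) (by norm_num)
      have := ih (m / 10) hm10 (n / 10) h3
      have hmod : m % 10 = n % 10 := pvDigitChar_inj _ (Nat.mod_lt _ (by norm_num)) _ (Nat.mod_lt _ (by norm_num)) (by simpa using h4)
      omega

lemma pvToChars_inj {m n : Int} (h : PySem.Int.toChars m = PySem.Int.toChars n) : m = n := by
  unfold PySem.Int.toChars at h
  have hdig : ∀ k : Nat, '-' ∉ Nat.toDigits 10 k := by
    intro k hk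
    have := Nat.isDigit_of_mem_toDigits (b := 10) (by norm_num) (by norm_num) hk
    simp_all
  split at h <;> split at h
  · rename_i h1 h2
    simp at h
    have := pvToDigits_inj _ _ h
    omega
  · rename_i h1 h2
    exfalso
    exact hdig n.toNat (h ▸ List.mem_cons_self ..)
  · rename_i h1 h2
    exfalso
    exact hdig m.toNat (h ▸ List.mem_cons_self ..)
  · rename_i h1 h2
    have := pvToDigits_inj _ _ h
    omega

lemma pvTokC_pipe_free (x : Int) : '|' ∉ PySem.Int.toChars x := fun h => (pvMem_toChars h).1 rfl

lemma pvSC_prefix : ∀ (A B : List Int), A ≠ [] → pvSC A <+: pvSC B → A <+: B := by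
  intro A
  induction A with
  | nil => intro B h; simp at h
  | cons a as ih =>
    intro B _ h
    cases B with
    | nil =>
      rw [pvSC_nil, List.prefix_nil] at h
      rw [pvSC_cons] at h
      simp [pvTokC] at h
    | cons b bs =>
      rw [pvSC_cons, pvSC_cons] at h
      -- reshape to '|' :: (toChars a ++ '|' :: restA) <+: '|' :: (toChars b ++ '|' :: restB)
      have h' : PySem.Int.toChars a ++ '|' :: (if as = [] then [] else ' ' :: pvSC as)
          <+: PySem.Int.toChars b ++ '|' :: (if bs = [] then [] else ' ' :: pvSC bs) := by
        simpa [pvTokC, List.cons_prefix_cons] using h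
      obtain ⟨hab, hrest⟩ := pvPipeFree_prefix _ _ (pvTokC_pipe_free a) (pvTokC_pipe_free b) h'
      have hab' : a = b := pvToChars_inj hab
      subst hab'
      cases as with
      | nil => exact (List.cons_prefix_cons).mpr ⟨rfl, List.nil_prefix⟩
      | cons a' as' =>
        cases bs with
        | nil =>
          simp at hrest
        | cons b' bs' =>
          simp only [if_neg (by simp : ¬(a' :: as' = [])), if_neg (by simp : ¬(b' :: bs' = []))] at hrest
          rw [List.cons_prefix_cons] at hrest
          exact (List.cons_prefix_cons).mpr ⟨rfl, ih _ (by simp) hrest.2⟩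

lemma pvSuffix_append_cases {α : Type} {s x y : List α} (h : s <:+ x ++ y) :
    s <:+ y ∨ ∃ x', x' <:+ x ∧ x' ≠ [] ∧ s = x' ++ y := by
  obtain ⟨u, hu⟩ := h
  have hs : s = (x ++ y).drop u.length := by
    have := congrArg (List.drop u.length) hu
    simpa using this
  rw [List.drop_append] at hs
  by_cases hc : u.length < x.length
  · right
    refine ⟨x.drop u.length, List.drop_suffix _ _, ?_, ?_⟩
    · simp [List.drop_eq_nil_iff]; omega
    · rw [hs, Nat.sub_eq_zero_of_le (le_of_lt hc), List.drop_zero]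
  · left
    rw [List.drop_eq_nil_iff.mpr (by omega)] at hs
    simp at hs
    exact hs ▸ List.drop_suffix _ _

lemma pvPipeFree_eq : ∀ (u d : List Char) {t : List Char}, '|' ∉ d → u ++ '|' :: t = d ++ ['|'] → t = [] := by
  intro u
  induction u with
  | nil =>
    intro d t hd h
    cases d with
    | nil => simpa using h
    | cons c d' =>
      simp only [List.nil_append, List.cons_append, List.cons.injEq] at h
      simp at hd
      exact absurd h.1 hd.1
  | cons c u' ih =>
    intro d t hd h
    cases d with
    | nil =>
      have := congrArg List.length h
      simp at this
    | cons c2 d' =>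
      simp only [List.cons_append, List.cons.injEq] at h
      exact ih d' (by simp at hd; exact hd.2) h.2

lemma pvTok_suffix {b : Int} {x t : List Char} (hs : x <:+ pvTokC b) (hx : x = '|' :: t) :
    x = pvTokC b ∨ x = ['|'] := by
  obtain ⟨u, hu⟩ := hs
  cases u with
  | nil => left; simpa using hu
  | cons c u' =>
    right
    simp only [pvTokC, List.cons_append, List.cons.injEq] at hu
    obtain ⟨-, hu⟩ := hu
    rw [hx] at hu
    have ht : t = [] := by
      have : u' ++ '|' :: t = PySem.Int.toChars b ++ ['|'] := by simpa using hu
      exact pvPipeFree_eq u' _ (pvTokC_pipe_free b) this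
    rw [hx, ht]

lemma pvSC_align : ∀ (B : List Int) (s : List Char), s <:+ pvSC B →
    ∀ A : List Int, A ≠ [] → pvSC A <+: s → ∃ j, pvSC A <+: pvSC (List.drop j B) := by
  intro B
  induction B with
  | nil =>
    intro s hsuf A hA hpre
    rw [pvSC_nil] at hsuf
    rw [List.suffix_nil] at hsuf
    subst hsuf
    rw [List.prefix_nil] at hpre
    cases A with
    | nil => simp at hA
    | cons a as => rw [pvSC_cons] at hpre; simp [pvTokC] at hpre
  | cons b bs ih =>
    intro s hsuf A hA hpre
    -- head of pvSC A is '|'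
    obtain ⟨a, as, rfl⟩ : ∃ a as, A = a :: as := by
      cases A with
      | nil => simp at hA
      | cons a as => exact ⟨a, as, rfl⟩
    have hheadA : ∃ tA, pvSC (a :: as) = '|' :: tA := by
      rw [pvSC_cons]; exact ⟨_, rfl⟩
    rw [pvSC_cons b bs] at hsuf
    rcases pvSuffix_append_cases hsuf with hcase | ⟨x', hx'suf, hx'ne, rfl⟩
    · -- s inside the part after the first token
      by_cases hbs : bs = []
      · subst hbs
        simp at hcase
        subst hcase
        rw [List.prefix_nil] at hpre
        obtain ⟨tA, htA⟩ := hheadA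
        simp [htA] at hpre
      · rw [if_neg hbs] at hcase
        rcases List.suffix_cons_iff.mp hcase with rfl | hcase
        · -- s = ' ' :: pvSC bs, but pvSC A starts with '|'
          obtain ⟨tA, htA⟩ := hheadA
          rw [htA] at hpre
          rw [List.cons_prefix_cons] at hpre
          exact absurd hpre.1 (by decide)
        · obtain ⟨j, hj⟩ := ih s hcase (a :: as) (by simp) hpre
          exact ⟨j + 1, by simpa using hj⟩
    · -- s = x' ++ restB with x' a nonempty suffix of the first token
      obtain ⟨tA, htA⟩ := hheadA
      -- x' starts with '|' because pvSC A does and x' is nonempty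
      obtain ⟨c, x'', rfl⟩ : ∃ c x'', x' = c :: x'' := by
        cases x' with
        | nil => simp at hx'ne
        | cons c x'' => exact ⟨c, x'', rfl⟩
      have hc : c = '|' := by
        rw [htA, List.cons_append, List.cons_prefix_cons] at hpre
        exact hpre.1.symm
      subst hc
      rcases pvTok_suffix hx'suf rfl with hx | hx
      · refine ⟨0, ?_⟩
        rw [List.drop_zero, pvSC_cons b bs, ← hx]
        exact hpre
      · -- x' = ['|'] : pvSC A = '|' :: (toChars a ++ …) would need toChars a to start at a
        -- separator/end, impossible
        exfalso
        rw [hx] at hpre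
        rw [htA] at hpre
        simp only [List.cons_append, List.cons_prefix_cons] at hpre
        have hpre2 := hpre.2
        have htA2 : tA = PySem.Int.toChars a ++ '|' :: (if as = [] then [] else ' ' :: pvSC as) := by
          have := htA
          rw [pvSC_cons] at this
          exact (by simpa [pvTokC] using this : _ = tA).symm
        rw [htA2] at hpre2
        obtain ⟨d, ds, hds⟩ : ∃ d ds, PySem.Int.toChars a = d :: ds := by
          cases hh : PySem.Int.toChars a with
          | nil => exact absurd hh (pvToChars_ne_nil a)
          | cons d ds => exact ⟨d, ds, rfl⟩
        rw [hds] at hpre2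
        by_cases hbs : bs = []
        · subst hbs
          simp at hpre2
        · rw [if_neg hbs] at hpre2
          simp only [List.nil_append] at hpre2
          have : d = ' ' := (List.cons_prefix_cons.mp hpre2).1
          exact absurd this (pvMem_toChars (by rw [hds]; simp)).2

def pvRot (k : List Int) (i : Nat) : List Int := k.drop i ++ k.take i

lemma pvInfix_rot {q k : List Int} (h : q <:+: k ++ k) (hlen : q.length = k.length)
    (hk : k ≠ []) : ∃ i < k.length, q = pvRot k i := by
  obtain ⟨u, v, huv⟩ := h
  have hu : u.length ≤ k.length := by
    have := congrArg List.length huv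
    simp at this
    omega
  have hq : q = ((k ++ k).drop u.length).take k.length := by
    rw [← huv, show u ++ q ++ v = u ++ (q ++ v) by simp, List.drop_left, List.take_append,
      List.take_of_length_le (le_of_eq hlen), hlen]
    simp
  have hrot : ((k ++ k).drop u.length).take k.length = pvRot k u.length := by
    rw [List.drop_append, Nat.sub_eq_zero_of_le hu, List.drop_zero, List.take_append,
      List.take_of_length_le (by simp), List.length_drop, Nat.sub_sub_self hu]
    rfl
  cases Nat.lt_or_ge u.length k.length with
  | inl hlt => exact ⟨u.length, hlt, by rw [hq, hrot]⟩
  | inr hge =>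
    have heq : u.length = k.length := le_antisymm hu hge
    refine ⟨0, List.length_pos_iff.mpr hk, ?_⟩
    rw [hq, hrot, heq]
    simp [pvRot]

lemma pvRot_infix {k : List Int} (i : Nat) : pvRot k i <:+: k ++ k :=
  ⟨k.take i, k.drop i, by
    simp only [pvRot, List.append_assoc, List.take_append_drop]
    rw [← List.append_assoc, List.take_append_drop]⟩

lemma pvSC_infix_of_infix {A B : List Int} (h : A <:+: B) : pvSC A <:+: pvSC B := by
  obtain ⟨u, v, huv⟩ := h
  by_cases hA : A = []
  · subst hA; rw [pvSC_nil]; exact List.nil_infix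
  by_cases hu : u = [] <;> by_cases hv : v = []
  · subst hu hv; simp at huv; rw [huv]
  · subst hu
    simp at huv
    rw [← huv, pvSC_append hA hv]
    exact ⟨[], ' ' :: pvSC v, by simp⟩
  · subst hv
    simp at huv
    rw [← huv, pvSC_append hu hA]
    exact ⟨pvSC u ++ [' '], [], by simp⟩
  · rw [← huv, show u ++ A ++ v = u ++ (A ++ v) by simp, pvSC_append hu (by simp [hA]),
      pvSC_append hA hv]
    exact ⟨pvSC u ++ [' '], ' ' :: pvSC v, by simp⟩

lemma pvIsIn_iff {q k : List Int} (hlen : q.length = k.length) :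
    PySem.Chars.isIn (pvSC q) (pvSC (k ++ k)) = true ↔ (q = [] ∨ ∃ i < k.length, q = pvRot k i) := by
  rw [PySem.Chars.isIn_iff_infix]
  constructor
  · intro h
    by_cases hq : q = []
    · exact Or.inl hq
    · right
      have hk : k ≠ [] := by
        intro hk; subst hk; simp at hlen; exact hq hlen
      obtain ⟨t, hpre, hsuf⟩ := List.infix_iff_prefix_suffix.mp h
      obtain ⟨j, hj⟩ := pvSC_align (k ++ k) t hsuf q hq hpre
      have hqk : q <+: (k ++ k).drop j := pvSC_prefix q _ hq hj
      have : q <:+: k ++ k :=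
        List.infix_iff_prefix_suffix.mpr ⟨(k ++ k).drop j, hqk, List.drop_suffix _ _⟩
      exact pvInfix_rot this hlen hk
  · rintro (rfl | ⟨i, hi, rfl⟩)
    · rw [pvSC_nil]; exact List.nil_infix
    · exact pvSC_infix_of_infix (pvRot_infix i)

lemma pvStrA (l : List Int) : (PySem.Str.join " " (l.map pvTokA)).toList = pvSC l := by
  rw [PySem.Str.toList_join, pvSC]
  simp only [List.map_map]
  congr 1
  apply List.map_congr_left
  intro x _
  simp [pvTokA, pvTokC, String.toList_append, PySem.Int.toList_toStr]

lemma pvIsRotation_iff {a b : List Int} :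
    pvIsRotation a b = true ↔ (a.length = b.length ∧ (a = [] ∨ ∃ i < b.length, a = pvRot b i)) := by
  unfold pvIsRotation
  by_cases hlen : a.length = b.length
  · rw [if_neg (by omega)]
    by_cases ha : a = []
    · subst ha
      simp [hlen.symm]
    · rw [if_neg (by simpa [List.isEmpty_iff] using ha)]
      simp only [List.any_eq_true, beq_iff_eq]
      constructor
      · rintro ⟨i, hmem, heq⟩
        have hi := PySem.List.mem_pyRange_one.mp hmem
        refine ⟨hlen, Or.inr ⟨i.toNat, by omega, ?_⟩⟩
        rw [heq, PySem.List.slice_from _ hi.1, PySem.List.slice_to _ hi.1]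
        rfl
      · rintro ⟨-, h | ⟨i, hi, heq⟩⟩
        · exact absurd h ha
        · refine ⟨(i : Int), PySem.List.mem_pyRange_one.mpr (by omega), ?_⟩
          rw [PySem.List.slice_from _ (by omega), PySem.List.slice_to _ (by omega)]
          simpa [pvRot] using heq
  · rw [if_pos (by omega)]
    simp [hlen]

lemma pvMatch_eq (q k : List Int) :
    (circularly_identical q k && (q.length == k.length)) =
      (pvIsRotation q k || pvIsRotation ((PySem.List.slice? q none none (-1)).getD []) k) := by
  rw [PySem.List.slice?_none_none_neg_one]
  simp only [Option.getD_some]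
  by_cases hlen : q.length = k.length
  · have hrevlen : q.reverse.length = k.length := by simpa using hlen
    apply Bool.eq_iff_iff.mpr
    simp only [Bool.and_eq_true, Bool.or_eq_true, beq_iff_eq]
    rw [pvIsRotation_iff, pvIsRotation_iff]
    unfold circularly_identical
    simp only [Bool.or_eq_true]
    rw [PySem.Str.isIn_iff_infix, PySem.Str.isIn_iff_infix, PySem.List.slice?_none_none_neg_one]
    simp only [Option.getD_some, ← List.map_reverse]
    rw [← List.map_append]
    simp only [pvStrA]
    have h1 := pvIsIn_iff hlen
    have h2 := pvIsIn_iff hrevlen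
    rw [PySem.Chars.isIn_iff_infix] at h1 h2
    constructor
    · rintro ⟨hin | hin, -⟩
      · exact Or.inl ⟨hlen, (h1.mp hin).imp_left id⟩
      · exact Or.inr ⟨hrevlen, (h2.mp hin)⟩
    · rintro (⟨-, hr⟩ | ⟨-, hr⟩)
      · exact ⟨Or.inl (h1.mpr hr), hlen⟩
      · exact ⟨Or.inr (h2.mpr hr), hlen⟩
  · apply Bool.eq_iff_iff.mpr
    simp only [Bool.and_eq_true, Bool.or_eq_true, beq_iff_eq]
    rw [pvIsRotation_iff, pvIsRotation_iff]
    constructor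
    · rintro ⟨-, h⟩; exact absurd h hlen
    · rintro (⟨h, -⟩ | ⟨h, -⟩)
      · exact absurd h hlen
      · exact absurd (by simpa using h) hlen


lemma pvRot_self (k : List Int) : pvRot k 0 = k := by simp [pvRot]
lemma pvRot_length_self (k : List Int) : pvRot k k.length = k := by simp [pvRot]

lemma pvMatch_eq_circ (q k : List Int) :
    (pvIsRotation q k || pvIsRotation q.reverse k) = pvCircMatch q k := by
  apply Bool.eq_iff_iff.mpr
  simp only [Bool.or_eq_true]
  rw [pvIsRotation_iff, pvIsRotation_iff]
  unfold pvCircMatch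
  simp only [Bool.and_eq_true, Bool.or_eq_true, beq_iff_eq, List.any_eq_true, List.mem_range]
  by_cases hlen : q.length = k.length
  · have hrevlen : q.reverse.length = k.length := by simpa using hlen
    by_cases hq : q = []
    · subst hq
      have hk : k = [] := by simpa using hlen.symm
      subst hk
      constructor
      · intro _; exact ⟨rfl, 0, by omega, Or.inl rfl⟩
      · intro _; exact Or.inl ⟨rfl, Or.inl rfl⟩
    · have hqr : q.reverse ≠ [] := by simpa using hq
      have hkne : k ≠ [] := by
        intro hk; subst hk; exact hq (by simpa using hlen)
      have hkpos : 0 < k.length := List.length_pos_iff.mpr hkne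
      constructor
      · rintro (⟨-, h | ⟨i, hi, hrot⟩⟩ | ⟨-, h | ⟨i, hi, hrot⟩⟩)
        · exact absurd h hq
        · exact ⟨hlen, i, by omega, Or.inl hrot⟩
        · exact absurd h hqr
        · exact ⟨hlen, i, by omega, Or.inr hrot⟩
      · rintro ⟨-, i, hi, hrot | hrot⟩
        · left
          refine ⟨hlen, Or.inr ?_⟩
          by_cases hik : i = k.length
          · exact ⟨0, hkpos, by rw [pvRot_self, ← pvRot_length_self k, ← hik]; exact hrot⟩
          · exact ⟨i, by omega, hrot⟩
        · right
          refine ⟨hrevlen, Or.inr ?_⟩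
          by_cases hik : i = k.length
          · exact ⟨0, hkpos, by rw [pvRot_self, ← pvRot_length_self k, ← hik]; exact hrot⟩
          · exact ⟨i, by omega, hrot⟩
  · constructor
    · rintro (⟨h, -⟩ | ⟨h, -⟩)
      · exact absurd h hlen
      · exact absurd (by simpa using h) hlen
    · rintro ⟨h, -⟩
      exact absurd h hlen

lemma pvFoldl_overwrite_some (p : List Int → Bool) (keys : List (List Int)) (v : List Int)
    (H : ∀ k ∈ keys, p k = true → k = v) :
    keys.foldl (fun ik k => if p k then some k else ik) (some v) = some v := by
  induction keys with
  | nil => rfl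
  | cons k ks ih =>
    simp only [List.foldl_cons]
    by_cases hp : p k = true
    · rw [if_pos hp, H k (by simp) hp]
      exact ih fun k' hk' => H k' (by simp [hk'])
    · rw [if_neg hp]
      exact ih fun k' hk' => H k' (by simp [hk'])

lemma pvFoldl_eq_find (p : List Int → Bool) (keys : List (List Int))
    (H : ∀ k1 ∈ keys, ∀ k2 ∈ keys, p k1 = true → p k2 = true → k1 = k2) :
    keys.foldl (fun ik k => if p k then some k else ik) none = keys.find? p := by
  induction keys with
  | nil => rfl
  | cons k ks ih =>
    simp only [List.foldl_cons]
    by_cases hp : p k = true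
    · rw [if_pos hp, List.find?_cons_of_pos hp]
      exact pvFoldl_overwrite_some p ks k fun k' hk' hp' =>
        H k' (by simp [hk']) k (by simp) hp' hp
    · rw [if_neg hp, List.find?_cons_of_neg hp]
      exact ih fun k1 h1 k2 h2 => H k1 (by simp [h1]) k2 (by simp [h2])

lemma pvFirstMatch_eq_find (q rev : List Int) (keys : List (List Int)) :
    pvFirstMatch q rev keys = keys.find? (fun k => pvIsRotation q k || pvIsRotation rev k) := by
  induction keys with
  | nil => rfl
  | cons k ks ih =>
    rw [pvFirstMatch]
    by_cases hp : (pvIsRotation q k || pvIsRotation rev k) = true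
    · rw [if_pos hp, List.find?_cons_of_pos (p := fun k => pvIsRotation q k || pvIsRotation rev k) hp]
    · rw [if_neg hp, List.find?_cons_of_neg (p := fun k => pvIsRotation q k || pvIsRotation rev k) hp, ih]

lemma pvCountP_two {p : List Int → Bool} {l : List (List Int)} {a b : List Int}
    (ha : a ∈ l) (hb : b ∈ l) (hne : a ≠ b) (hpa : p a = true) (hpb : p b = true) :
    2 ≤ l.countP p := by
  obtain ⟨s, t, rfl⟩ := List.append_of_mem ha
  have hb' : b ∈ s ++ t := by
    rcases List.mem_append.mp hb with h | h
    · exact List.mem_append.mpr (Or.inl h)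
    · rcases List.mem_cons.mp h with h | h
      · exact absurd h.symm hne
      · exact List.mem_append.mpr (Or.inr h)
  have h1 : 1 ≤ (s ++ t).countP p := List.countP_pos_iff.mpr ⟨b, hb', hpb⟩
  have : (s ++ (a :: t)).countP p = s.countP p + (1 + t.countP p) := by
    rw [List.countP_append, List.countP_cons_of_pos hpa]
    omega
  rw [this]
  rw [List.countP_append] at h1
  omega

lemma pvMatch_eq' (q k : List Int) :
    (circularly_identical q k && (q.length == k.length)) =
      (pvIsRotation q k || pvIsRotation q.reverse k) := by
  rw [pvMatch_eq, PySem.List.slice?_none_none_neg_one]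
  rfl

theorem pvMain (query : List Int) (keys : List (List Int))
    (hpre : Pre_find_circular_key query keys) :
    find_circular_key query keys = find_circular_key_alt query keys := by
  unfold find_circular_key find_circular_key_alt
  rw [PySem.List.slice?_none_none_neg_one]
  simp only [Option.getD_some]
  by_cases hkeys : keys = []
  · subst hkeys
    simp [pvFirstMatch]
  · rw [if_pos hkeys]
    have hfun : (fun (ik : Option (List Int)) key =>
        if circularly_identical query key && (query.length == key.length) then some key else ik)
        = (fun (ik : Option (List Int)) key =>
            if (pvIsRotation query key || pvIsRotation query.reverse key) then some key else ik) := by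
      funext ik key
      rw [pvMatch_eq']
    have H : ∀ k1 ∈ keys, ∀ k2 ∈ keys,
        (pvIsRotation query k1 || pvIsRotation query.reverse k1) = true →
        (pvIsRotation query k2 || pvIsRotation query.reverse k2) = true → k1 = k2 := by
      rcases hpre with hq | hcount
      · subst hq
        have hnil : ∀ k, (pvIsRotation ([] : List Int) k || pvIsRotation ([] : List Int).reverse k) = true → k = [] := by
          intro k hk
          rcases (Bool.or_eq_true _ _).mp hk with h | h <;>
            · have := (pvIsRotation_iff.mp h).1
              simp at this
              exact List.eq_nil_of_length_eq_zero this.symm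
        intro k1 h1 k2 h2 hp1 hp2
        rw [hnil k1 hp1, hnil k2 hp2]
      · intro k1 h1 k2 h2 hp1 hp2
        by_contra hne
        have hc1 : pvCircMatch query k1 = true := by rw [← pvMatch_eq_circ]; exact hp1
        have hc2 : pvCircMatch query k2 = true := by rw [← pvMatch_eq_circ]; exact hp2
        have := pvCountP_two h1 h2 hne hc1 hc2
        omega
    rw [hfun, pvFoldl_eq_find _ _ H, ← pvFirstMatch_eq_find]

-- ===== VERDICT (by name: the statement is the Claim_ definition above) =====
theorem find_circular_key_spec : Claim_equal_find_circular_key := by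
  intro query keys _ hpre
  unfold Spec_find_circular_key
  exact pvMain query keys hpre
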